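-- pv_equiv track=rewrite | github.com/AlonNaor22/news-summarizer-agent | src/sentiment.py | parse_sentiment_response
-- ===== SOURCE A (Python) =====
-- VALID_SENTIMENTS = ["positive", "negative", "neutral"]
--
-- def parse_sentiment_response(response: str) -> dict:
--     """
--     Parse Claude's sentiment response into structured data.
--
--     PARAMETERS:
--     -----------
--     response : str
--         Raw text from Claude in format:
--         "SENTIMENT: positive
--          CONFIDENCE: high
--          REASON: ..."
--
--     RETURNS:
--     --------
--     dict with keys:
--         - sentiment: "positive", "negative", or "neutral"
--         - confidence: "high", "medium", or "low"
--         - reason: explanation string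
--
--     EDGE CASES HANDLED:
--     -------------------
--     1. Extra whitespace
--     2. Different capitalizations
--     3. Missing fields (defaults provided)
--     4. Invalid sentiment values (defaults to "neutral")
--     """
--
--     result = {
--         "sentiment": "neutral",    # Default if parsing fails
--         "confidence": "medium",
--         "reason": "Unable to determine sentiment"
--     }
--
--     # Split response into lines and process each
--     lines = response.strip().split("\n")
--
--     for line in lines:
--         line = line.strip()
--
--         # Parse SENTIMENT line
--         if line.upper().startswith("SENTIMENT:"):
--             value = line.split(":", 1)[1].strip().lower()
--             # Validate against allowed values
--             if value in VALID_SENTIMENTS: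
--                 result["sentiment"] = value
--             else:
--                 # If Claude returns something unexpected, default to neutral
--                 result["sentiment"] = "neutral"
--
--         # Parse CONFIDENCE line
--         elif line.upper().startswith("CONFIDENCE:"):
--             value = line.split(":", 1)[1].strip().lower()
--             if value in ["high", "medium", "low"]:
--                 result["confidence"] = value
--
--         # Parse REASON line
--         elif line.upper().startswith("REASON:"):
--             value = line.split(":", 1)[1].strip()
--             result["reason"] = value
--
--     return result
-- ===== SOURCE B (Python) =====
-- VALID_SENTIMENTS = ["positive", "negative", "neutral"]
--
-- def parse_sentiment_response(response: str) -> dict: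
--     # Scan the lines back to front: the last occurrence wins, so the first
--     # match seen from the end fills each still-empty slot; stop early once
--     # all three fields are known.
--     s = c = r = None
--     for raw in reversed(response.strip().split("\n")):
--         line = raw.strip()
--         u = line.upper()
--         if s is None and u.startswith("SENTIMENT:"):
--             v = line.split(":", 1)[1].strip().lower()
--             s = v if v in VALID_SENTIMENTS else "neutral"
--         elif c is None and u.startswith("CONFIDENCE:"):
--             v = line.split(":", 1)[1].strip().lower()
--             if v in ("high", "medium", "low"):
--                 c = v
--         elif r is None and u.startswith("REASON:"):
--             r = line.split(":", 1)[1].strip()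
--         if s is not None and c is not None and r is not None:
--             break
--     return {
--         "sentiment": s if s is not None else "neutral",
--         "confidence": c if c is not None else "medium",
--         "reason": r if r is not None else "Unable to determine sentiment",
--     }
-- ===== Notes on version B (the rewrite author's own statement) =====
-- stated objective: alternative
-- what changed: B scans the lines back to front with three Option slots (first match from the end wins, skipping invalid confidence values) and breaks early once all three fields are filled, instead of A's forward loop that keeps overwriting a result dict.
import Mathlib
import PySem

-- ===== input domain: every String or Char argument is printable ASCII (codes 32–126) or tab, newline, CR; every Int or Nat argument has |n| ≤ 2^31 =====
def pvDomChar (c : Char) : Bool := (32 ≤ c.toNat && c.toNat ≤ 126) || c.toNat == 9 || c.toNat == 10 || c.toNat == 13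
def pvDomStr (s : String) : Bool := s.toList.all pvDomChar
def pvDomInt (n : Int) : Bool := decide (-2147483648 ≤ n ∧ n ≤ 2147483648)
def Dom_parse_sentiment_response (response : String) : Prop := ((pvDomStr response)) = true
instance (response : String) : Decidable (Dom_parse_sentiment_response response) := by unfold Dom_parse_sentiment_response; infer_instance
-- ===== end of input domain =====

-- B scans the lines back to front, filling each still-missing field from the first match
-- seen from the end (= last occurrence) and stopping once all three are known; same
-- return value as A, different traversal ('alternative' objective).

-- ===== PORT A =====
def pvVALID_SENTIMENTS : List String := ["positive", "negative", "neutral"]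

-- line.split(":", 1)[1] — the .getD "" default is unreachable: every call site is guarded
-- by startswith "…:", so the split always yields two pieces.
def pvRest (line : String) : String := ((PySem.Str.splitMax? line ":" 1).getD []).getD 1 ""

def pvStepA (d : PySem.Dict String String) (line0 : String) : PySem.Dict String String :=
  let line := PySem.Str.strip line0
  if PySem.Str.startswith (PySem.Str.upper line) "SENTIMENT:" then
    let value := PySem.Str.lower (PySem.Str.strip (pvRest line))
    if value ∈ pvVALID_SENTIMENTS then d.insert "sentiment" value
    else d.insert "sentiment" "neutral"
  else if PySem.Str.startswith (PySem.Str.upper line) "CONFIDENCE:" then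
    let value := PySem.Str.lower (PySem.Str.strip (pvRest line))
    if value ∈ ["high", "medium", "low"] then d.insert "confidence" value else d
  else if PySem.Str.startswith (PySem.Str.upper line) "REASON:" then
    d.insert "reason" (PySem.Str.strip (pvRest line))
  else d

def parse_sentiment_response (response : String) : List (String × String) :=
  let result : PySem.Dict String String :=
    PySem.Dict.ofList [("sentiment", "neutral"), ("confidence", "medium"),
                       ("reason", "Unable to determine sentiment")]
  let lines := ((PySem.Str.split? (PySem.Str.strip response) "\n").getD [])
  (lines.foldl pvStepA result).items

-- ===== PORT B =====
-- one loop-body iteration of Source B (fills the still-empty slots from one line)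
def pvFillB (line0 : String) (s c r : Option String) :
    Option String × Option String × Option String :=
  let line := PySem.Str.strip line0
  let u := PySem.Str.upper line
  if s.isNone && PySem.Str.startswith u "SENTIMENT:" then
    let v := PySem.Str.lower (PySem.Str.strip (pvRest line))
    (some (if v ∈ pvVALID_SENTIMENTS then v else "neutral"), c, r)
  else if c.isNone && PySem.Str.startswith u "CONFIDENCE:" then
    let v := PySem.Str.lower (PySem.Str.strip (pvRest line))
    (s, if v ∈ ["high", "medium", "low"] then some v else c, r)
  else if r.isNone && PySem.Str.startswith u "REASON:" then
    (s, c, some (PySem.Str.strip (pvRest line)))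
  else (s, c, r)

-- the reversed loop with the early break once all three slots are filled
def pvGoB : List String → Option String → Option String → Option String →
    Option String × Option String × Option String
  | [], s, c, r => (s, c, r)
  | line0 :: rest, s, c, r =>
    match pvFillB line0 s c r with
    | (s', c', r') =>
      if s'.isSome && c'.isSome && r'.isSome then (s', c', r') else pvGoB rest s' c' r'

def parse_sentiment_response_alt (response : String) : List (String × String) :=
  let lines := ((PySem.Str.split? (PySem.Str.strip response) "\n").getD [])
  match pvGoB lines.reverse none none none with
  | (s, c, r) =>
    [("sentiment", s.getD "neutral"), ("confidence", c.getD "medium"),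
     ("reason", r.getD "Unable to determine sentiment")]

-- ===== PRECONDITION & SPEC =====
def Spec_parse_sentiment_response (response : String) (out : List (String × String)) : Prop := out = parse_sentiment_response_alt response
instance (response : String) (out : List (String × String)) : Decidable (Spec_parse_sentiment_response response out) := by unfold Spec_parse_sentiment_response; infer_instance

-- ===== CLAIM (what is proved, stated in full; the proofs are below) =====
def Claim_equal_parse_sentiment_response : Prop := ∀ (response : String), Dom_parse_sentiment_response response → Spec_parse_sentiment_response response (parse_sentiment_response response)

-- ===== LEMMAS AND PROOFS =====

-- A's per-line update expressed on the triple of field values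
def pvStepT (t : String × String × String) (line0 : String) : String × String × String :=
  let line := PySem.Str.strip line0
  if PySem.Str.startswith (PySem.Str.upper line) "SENTIMENT:" then
    let v := PySem.Str.lower (PySem.Str.strip (pvRest line))
    (if v ∈ pvVALID_SENTIMENTS then v else "neutral", t.2.1, t.2.2)
  else if PySem.Str.startswith (PySem.Str.upper line) "CONFIDENCE:" then
    let v := PySem.Str.lower (PySem.Str.strip (pvRest line))
    (t.1, if v ∈ ["high", "medium", "low"] then v else t.2.1, t.2.2)
  else if PySem.Str.startswith (PySem.Str.upper line) "REASON:" then
    (t.1, t.2.1, PySem.Str.strip (pvRest line))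
  else t

-- what one line contributes to each field
def pvCl (line0 : String) : Option String × Option String × Option String :=
  let line := PySem.Str.strip line0
  if PySem.Str.startswith (PySem.Str.upper line) "SENTIMENT:" then
    let v := PySem.Str.lower (PySem.Str.strip (pvRest line))
    (some (if v ∈ pvVALID_SENTIMENTS then v else "neutral"), none, none)
  else if PySem.Str.startswith (PySem.Str.upper line) "CONFIDENCE:" then
    let v := PySem.Str.lower (PySem.Str.strip (pvRest line))
    (none, if v ∈ ["high", "medium", "low"] then some v else none, none)
  else if PySem.Str.startswith (PySem.Str.upper line) "REASON:" then
    (none, none, some (PySem.Str.strip (pvRest line)))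
  else (none, none, none)

theorem pvHeadPrefix {α : Type} {a b : α} {p q u : List α}
    (h1 : (a :: p) <+: u) (h2 : (b :: q) <+: u) : a = b := by
  rcases h1 with ⟨t1, e1⟩
  rcases h2 with ⟨t2, e2⟩
  have := e1.trans e2.symm
  simp only [List.cons_append, List.cons.injEq] at this
  exact this.1

theorem pv_excl (u : String) (p q : String) (a b : Char) (p' q' : List Char)
    (hp : p.toList = a :: p') (hq : q.toList = b :: q') (hab : a ≠ b)
    (h : PySem.Str.startswith u p = true) : PySem.Str.startswith u q = false := by
  simp only [PySem.Str.startswith_eq] at h ⊢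
  rw [Bool.eq_false_iff]
  intro hc
  have h1 := (PySem.Chars.startswith_iff _ _).mp h
  have h2 := (PySem.Chars.startswith_iff _ _).mp hc
  rw [hp] at h1
  rw [hq] at h2
  exact hab (pvHeadPrefix h1 h2)

theorem pv_excl_SC (u : String) (h : PySem.Str.startswith u "SENTIMENT:" = true) :
    PySem.Str.startswith u "CONFIDENCE:" = false :=
  pv_excl u _ _ 'S' 'C' "ENTIMENT:".toList "ONFIDENCE:".toList rfl rfl (by decide) h

theorem pv_excl_SR (u : String) (h : PySem.Str.startswith u "SENTIMENT:" = true) :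
    PySem.Str.startswith u "REASON:" = false :=
  pv_excl u _ _ 'S' 'R' "ENTIMENT:".toList "EASON:".toList rfl rfl (by decide) h

theorem pv_excl_CR (u : String) (h : PySem.Str.startswith u "CONFIDENCE:" = true) :
    PySem.Str.startswith u "REASON:" = false :=
  pv_excl u _ _ 'C' 'R' "ONFIDENCE:".toList "EASON:".toList rfl rfl (by decide) h

theorem pvFillB_eq (line0 : String) (s c r : Option String) :
    pvFillB line0 s c r =
      (s.orElse (fun _ => (pvCl line0).1), c.orElse (fun _ => (pvCl line0).2.1),
       r.orElse (fun _ => (pvCl line0).2.2)) := by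
  by_cases hb1 : PySem.Str.startswith (PySem.Str.upper (PySem.Str.strip line0)) "SENTIMENT:" = true
  · have hb2 := pv_excl_SC _ hb1
    have hb3 := pv_excl_SR _ hb1
    cases s <;> cases c <;> cases r <;>
      simp only [pvFillB, pvCl, hb1, hb2, hb3, Option.isNone_none, Option.isNone_some,
        Bool.true_and, Bool.false_and, Bool.false_eq_true, if_true, if_false] <;> simp
  · simp only [Bool.not_eq_true] at hb1
    by_cases hb2 : PySem.Str.startswith (PySem.Str.upper (PySem.Str.strip line0)) "CONFIDENCE:" = true
    · have hb3 := pv_excl_CR _ hb2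
      cases s <;> cases c <;> cases r <;>
        simp only [pvFillB, pvCl, hb1, hb2, hb3, Option.isNone_none, Option.isNone_some,
          Bool.true_and, Bool.false_and, Bool.false_eq_true, if_true, if_false] <;> simp
    · simp only [Bool.not_eq_true] at hb2
      by_cases hb3 : PySem.Str.startswith (PySem.Str.upper (PySem.Str.strip line0)) "REASON:" = true
      · cases s <;> cases c <;> cases r <;>
          simp only [pvFillB, pvCl, hb1, hb2, hb3, Option.isNone_none, Option.isNone_some,
            Bool.true_and, Bool.false_and, Bool.false_eq_true, if_true, if_false] <;> simp
      · simp only [Bool.not_eq_true] at hb3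
        cases s <;> cases c <;> cases r <;>
          simp only [pvFillB, pvCl, hb1, hb2, hb3, Option.isNone_none, Option.isNone_some,
            Bool.true_and, Bool.false_and, Bool.false_eq_true, if_true, if_false] <;> simp

theorem pvFillB_full (line0 : String) (a b c : String) :
    pvFillB line0 (some a) (some b) (some c) = (some a, some b, some c) := by
  rw [pvFillB_eq]; rfl

theorem pvFoldFill_full (rest : List String) (a b c : String) :
    rest.foldl (fun t l => pvFillB l t.1 t.2.1 t.2.2) (some a, some b, some c) =
      (some a, some b, some c) := by
  induction rest with
  | nil => rfl
  | cons l t ih => simpa [pvFillB_full] using ih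

theorem pvGoB_eq (rest : List String) : ∀ (s c r : Option String),
    pvGoB rest s c r = rest.foldl (fun t l => pvFillB l t.1 t.2.1 t.2.2) (s, c, r) := by
  induction rest with
  | nil => intro s c r; rfl
  | cons l t ih =>
    intro s c r
    show (match pvFillB l s c r with
      | (s', c', r') =>
        if s'.isSome && c'.isSome && r'.isSome then (s', c', r') else pvGoB t s' c' r') = _
    rcases hf : pvFillB l s c r with ⟨s', c', r'⟩
    simp only [List.foldl_cons, hf]
    by_cases hs : (s'.isSome && c'.isSome && r'.isSome) = true
    · rcases Option.isSome_iff_exists.mp (show s'.isSome = true by simp_all) with ⟨a, rfl⟩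
      rcases Option.isSome_iff_exists.mp (show c'.isSome = true by simp_all) with ⟨b, rfl⟩
      rcases Option.isSome_iff_exists.mp (show r'.isSome = true by simp_all) with ⟨cc, rfl⟩
      simp [pvFoldFill_full]
    · rw [if_neg hs, ih]

theorem pvStepA_dict (s c r : String) (line0 : String) :
    pvStepA (PySem.Dict.mk [("sentiment", s), ("confidence", c), ("reason", r)]) line0 =
      PySem.Dict.mk [("sentiment", (pvStepT (s, c, r) line0).1),
                     ("confidence", (pvStepT (s, c, r) line0).2.1),
                     ("reason", (pvStepT (s, c, r) line0).2.2)] := by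
  simp only [pvStepA, pvStepT]
  split_ifs <;> simp [PySem.Dict.insert, PySem.Dict.contains]

theorem pvFoldA (lines : List String) : ∀ (s c r : String),
    lines.foldl pvStepA (PySem.Dict.mk [("sentiment", s), ("confidence", c), ("reason", r)]) =
      PySem.Dict.mk [("sentiment", (lines.foldl pvStepT (s, c, r)).1),
                     ("confidence", (lines.foldl pvStepT (s, c, r)).2.1),
                     ("reason", (lines.foldl pvStepT (s, c, r)).2.2)] := by
  induction lines with
  | nil => intro s c r; rfl
  | cons l t ih =>
    intro s c r
    simp only [List.foldl_cons, pvStepA_dict]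
    rw [ih]

theorem pvStepT_cl (s c r : String) (l : String) :
    pvStepT (s, c, r) l = ((pvCl l).1.getD s, (pvCl l).2.1.getD c, (pvCl l).2.2.getD r) := by
  simp only [pvStepT, pvCl]
  split_ifs <;> simp

theorem pvGetD_orElse {α : Type} (a b : Option α) (d : α) :
    a.getD (b.getD d) = (a.orElse (fun _ => b)).getD d := by
  cases a <;> rfl

theorem pvMain (lines : List String) : ∀ (s c r : String),
    lines.foldl pvStepT (s, c, r) =
      ((lines.reverse.foldl (fun t l => pvFillB l t.1 t.2.1 t.2.2) (none, none, none)).1.getD s,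
       (lines.reverse.foldl (fun t l => pvFillB l t.1 t.2.1 t.2.2) (none, none, none)).2.1.getD c,
       (lines.reverse.foldl (fun t l => pvFillB l t.1 t.2.1 t.2.2) (none, none, none)).2.2.getD r) := by
  induction lines with
  | nil => intro s c r; rfl
  | cons l t ih =>
    intro s c r
    rw [List.foldl_cons, pvStepT_cl, ih, List.reverse_cons, List.foldl_append,
      List.foldl_cons, List.foldl_nil, pvFillB_eq]
    simp only [pvGetD_orElse]

-- ===== VERDICT (by name: the statement is the Claim_ definition above) =====
theorem parse_sentiment_response_spec : Claim_equal_parse_sentiment_response := by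
  intro response _
  unfold Spec_parse_sentiment_response
  show parse_sentiment_response response = parse_sentiment_response_alt response
  have h0 : (PySem.Dict.ofList [("sentiment", "neutral"), ("confidence", "medium"),
      ("reason", "Unable to determine sentiment")] : PySem.Dict String String) =
      PySem.Dict.mk [("sentiment", "neutral"), ("confidence", "medium"),
      ("reason", "Unable to determine sentiment")] := by decide
  simp only [parse_sentiment_response, parse_sentiment_response_alt, h0, pvFoldA, pvGoB_eq,
    pvMain]
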